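-- pv_equiv track=rewrite | github.com/ke4ukz/pyvisca | build/lib/pyvisca/visca.py | _combinenibbles
-- ===== SOURCE A (Python) =====
-- def _combinenibbles(v):
-- 	"""Combines a list of individual nibbles (0x00 to 0x0f) to an integer"""
-- 	r = 0
-- 	n = len(v)
-- 	if (n == 0):
-- 		return 0
-- 	for i in range(0, n):
-- 		c = v[i]
-- 		m = 16 ** (n - i - 1)
-- 		r += (c * m)
-- 	return r
-- ===== SOURCE B (Python) =====
-- def _combinenibbles(v):
-- 	"""Combines a list of individual nibbles (0x00 to 0x0f) to an integer"""
-- 	r = 0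
-- 	for c in v:
-- 		r = r * 16 + c
-- 	return r
-- ===== Notes on version B (the rewrite author's own statement) =====
-- stated objective: simpler
-- what changed: Replaces the positional-power sum (recomputing the big-integer power 16**(n-i-1) for every index, with an n==0 guard) by a single forward Horner recurrence r = r*16 + c over the elements, needing no length, no indexing, no exponentiation and no guard.
import Mathlib
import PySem

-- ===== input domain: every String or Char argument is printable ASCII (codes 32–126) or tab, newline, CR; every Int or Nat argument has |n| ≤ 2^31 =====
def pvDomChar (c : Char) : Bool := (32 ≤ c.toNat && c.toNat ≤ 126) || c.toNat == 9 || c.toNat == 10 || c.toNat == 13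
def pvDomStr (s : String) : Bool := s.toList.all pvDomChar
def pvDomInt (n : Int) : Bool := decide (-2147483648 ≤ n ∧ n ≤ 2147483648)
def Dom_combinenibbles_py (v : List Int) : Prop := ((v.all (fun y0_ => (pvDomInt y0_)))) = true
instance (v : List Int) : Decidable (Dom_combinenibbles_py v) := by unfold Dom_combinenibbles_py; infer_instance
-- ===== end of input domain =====

-- B replaces A's positional-power sum (with its n==0 guard) by a single Horner recurrence; objective: simpler.

-- ===== PORT A =====
def combinenibbles_py (v : List Int) : Int :=
  let r : Int := 0
  let n : Int := v.length
  if n = 0 then 0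
  else
    (PySem.List.pyRange 0 n 1).foldl
      (fun r i =>
        let c := PySem.List.pyGetD v i 0
        let m : Int := 16 ^ (n - i - 1).toNat
        r + c * m) r

-- ===== PORT B =====
def combinenibbles_py_alt (v : List Int) : Int :=
  v.foldl (fun r c => r * 16 + c) 0

-- ===== PRECONDITION & SPEC =====
def Spec_combinenibbles_py (v : List Int) (out : Int) : Prop := out = combinenibbles_py_alt v
instance (v : List Int) (out : Int) : Decidable (Spec_combinenibbles_py v out) := by unfold Spec_combinenibbles_py; infer_instance

-- ===== CLAIM (what is proved, stated in full; the proofs are below) =====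
def Claim_equal_combinenibbles_py : Prop := ∀ (v : List Int), Dom_combinenibbles_py v → Spec_combinenibbles_py v (combinenibbles_py v)

-- ===== LEMMAS AND PROOFS =====

-- Horner fold from an arbitrary accumulator: the accumulator is shifted by 16^length.
theorem horner_shift (xs : List Int) : ∀ (r0 : Int),
    xs.foldl (fun r c => r * 16 + c) r0
      = r0 * 16 ^ xs.length + xs.foldl (fun r c => r * 16 + c) 0 := by
  induction xs with
  | nil => intro r0; simp
  | cons x t ih =>
    intro r0
    simp only [List.foldl_cons, List.length_cons]
    rw [ih (r0 * 16 + x), ih (0 * 16 + x)]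
    ring

-- A's indexed loop from position a equals r0 plus the Horner value of the suffix.
theorem loop_eq_horner (v : List Int) : ∀ (a : Nat) (r0 : Int), a ≤ v.length →
    (PySem.List.pyRange a v.length 1).foldl
      (fun r i => r + PySem.List.pyGetD v i 0 * 16 ^ (((v.length : Int)) - i - 1).toNat) r0
      = r0 + (v.drop a).foldl (fun r c => r * 16 + c) 0 := by
  intro a
  induction h : v.length - a generalizing a with
  | zero =>
    intro r0 ha
    have hae : a = v.length := by omega
    subst hae
    rw [PySem.List.pyRange_one_eq_nil (by omega)]
    simp
  | succ k ih =>
    intro r0 ha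
    have halt : a < v.length := by omega
    rw [PySem.List.pyRange_one_cons (by exact_mod_cast halt)]
    simp only [List.foldl_cons]
    have hcast : ((a : Int) + 1) = ((a + 1 : Nat) : Int) := by push_cast; ring
    rw [hcast, ih (a + 1) (by omega) _ (by omega)]
    have hget : PySem.List.pyGetD v (a : Int) 0 = v[a] := by
      rw [PySem.List.pyGetD_natCast]
      exact List.getD_eq_getElem v 0 halt
    have hdrop : v.drop a = v[a] :: v.drop (a + 1) := List.drop_eq_getElem_cons halt
    rw [hget, hdrop]
    simp only [List.foldl_cons]
    rw [horner_shift (v.drop (a + 1)) (0 * 16 + v[a])]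
    have hlen : (v.drop (a + 1)).length = v.length - (a + 1) := List.length_drop
    rw [hlen]
    have hexp : (((v.length : Int)) - (a : Int) - 1).toNat = v.length - (a + 1) := by omega
    rw [hexp]
    ring

-- ===== VERDICT (by name: the statement is the Claim_ definition above) =====
theorem combinenibbles_py_spec : Claim_equal_combinenibbles_py := by
  intro v _
  unfold Spec_combinenibbles_py combinenibbles_py combinenibbles_py_alt
  by_cases hv : (v.length : Int) = 0
  · have hnil : v = [] := by
      cases v with
      | nil => rfl
      | cons x t => exfalso; simp at hv; omega
    subst hnil; simp
  · simp only [hv, if_false]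
    have h := loop_eq_horner v 0 0 (Nat.zero_le _)
    simp only [Nat.cast_zero, List.drop_zero, zero_add] at h
    exact h
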